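-- pv_equiv track=rewrite | github.com/sylvainEllenstein/hello_world | keylogger.py | fuite_de_clavier
-- ===== SOURCE A (Python) =====
-- def fuite_de_clavier(n, k, chaine):
--     """
--     :param n: taille de la chaîne
--     :type n: int
--     :param k: taille du mot de passe
--     :type k: int
--     :param chaine: la chaîne contenant le mot de passe
--     :type chaine: list[str]
--     """
--     # TODO afficher le nombre de mots de passes possibles parmi la chaîne
--
--     specChar = '"!' + "#$%&'()*+,-./:;<=>?@[\]^_`{|}~"
--     mins = "abcdefghijklmnopqrstuvwxyz"
--     # majs = mins.upper()
--     nums = "0123456789"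
--     nSousChaines = n - k + 1
--     nValides = 0
--
--     sChaine = chaine[:k]
--     wordHashmap = {"nmins" : 0,  "nmajs" : 0, "nnums" : 0, "nspec" : 0}
--
--     def typeChar(char) :
--         if char in specChar :
--             return "nspec"
--         if char in mins :
--             return "nmins"
--         if char in nums :
--             return "nnums"
--         return "nmajs"
--
--     for char in sChaine :
--         wordHashmap[typeChar(char)] += 1
--
--     if all([i for i in wordHashmap.values()]) :
--         nValides += 1
--
--     for i in range(nSousChaines -  1):
--         deletedChar = chaine[i] ; addedChar = chaine[i + k]
--         wordHashmap[typeChar(deletedChar)] -= 1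
--         wordHashmap[typeChar(addedChar)] += 1
--
--         if all([i for i in wordHashmap.values()]) :
--             nValides += 1
--
--
--     return nValides
-- ===== SOURCE B (Python) =====
-- def fuite_de_clavier(n, k, chaine):
--     specChar = '"!' + "#$%&'()*+,-./:;<=>?@[\]^_`{|}~"
--     mins = "abcdefghijklmnopqrstuvwxyz"
--     nums = "0123456789"
--
--     def cat(c):
--         if c in specChar:
--             return 0
--         if c in mins:
--             return 1
--         if c in nums:
--             return 2
--         return 3
--
--     total = 0
--     for i in range(n - k + 1):
--         if len({cat(c) for c in chaine[i:i + k]}) == 4: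
--             total += 1
--     return total
-- ===== Notes on version B (the rewrite author's own statement) =====
-- stated objective: simpler
-- what changed: Replaces A's incrementally slid hashmap of class counts (decrement the leaving char, increment the entering char, test all counts truthy) with a direct loop over the n-k+1 window starts that freshly slices chaine[i:i+k] and counts it iff the set of character classes in it has size 4; Pre_ excludes negative k (A reads chaine[i+k] through negative indexing, an accident, while B takes negative slices) and n exceeding both len(chaine) and k, where A raises IndexError.
-- intended difference: When n < k there is no length-k substring, yet A still tests the truncated prefix chaine[:k] and returns 1 if it happens to contain all four character classes; B returns the intended 0 (no window of length k exists). — e.g. on fuite_de_clavier(1, 4, ["a", "B", "1", "!"]): A returns 1, B returns 0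
-- outside the precondition, e.g. on fuite_de_clavier(1, -2, ['#', '#', 'a', '2', 'Y', 'a']): A returns 2, B returns 1
import Mathlib
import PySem

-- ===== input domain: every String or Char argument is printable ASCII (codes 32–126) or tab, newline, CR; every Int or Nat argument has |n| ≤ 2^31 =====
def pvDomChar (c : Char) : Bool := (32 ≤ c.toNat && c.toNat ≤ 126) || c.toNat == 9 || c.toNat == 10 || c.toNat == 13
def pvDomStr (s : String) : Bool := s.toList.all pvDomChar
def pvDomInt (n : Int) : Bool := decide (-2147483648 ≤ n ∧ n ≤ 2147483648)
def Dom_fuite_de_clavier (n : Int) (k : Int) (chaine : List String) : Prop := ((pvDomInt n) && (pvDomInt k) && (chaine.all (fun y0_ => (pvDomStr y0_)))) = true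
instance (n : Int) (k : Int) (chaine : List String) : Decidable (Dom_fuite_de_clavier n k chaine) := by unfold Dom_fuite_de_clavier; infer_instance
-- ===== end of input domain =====

-- B drops A's incremental sliding-window hashmap and recounts each window from a fresh slice
-- (simpler, not faster); for n < k B counts no window while A still tests the truncated prefix.

def pvSpecStr : String := "\"!#$%&'()*+,-./:;<=>?@[\\]^_`{|}~"
def pvMinsStr : String := "abcdefghijklmnopqrstuvwxyz"
def pvNumsStr : String := "0123456789"

-- ===== PORT A =====
def typeCharA (c : String) : String :=
  if PySem.Str.isIn c pvSpecStr then "nspec"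
  else if PySem.Str.isIn c pvMinsStr then "nmins"
  else if PySem.Str.isIn c pvNumsStr then "nnums"
  else "nmajs"

-- all([i for i in wordHashmap.values()]) : every value truthy (≠ 0)
def allValsA (d : PySem.Dict String Int) : Bool := (PySem.Dict.values d).all (fun v => !(v == 0))

def fuite_de_clavier (n : Int) (k : Int) (chaine : List String) : Int :=
  let nSousChaines := n - k + 1
  let sChaine := PySem.List.slice chaine none (some k)
  let d0 : PySem.Dict String Int :=
    PySem.Dict.ofList [("nmins", 0), ("nmajs", 0), ("nnums", 0), ("nspec", 0)]
  let d1 := sChaine.foldl (fun d c => PySem.Dict.modify d (typeCharA c) 0 (· + 1)) d0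
  let nValides : Int := if allValsA d1 then 0 + 1 else 0
  let st := (PySem.List.pyRange 0 (nSousChaines - 1) 1).foldl
    (fun (st : PySem.Dict String Int × Int) i =>
      let deletedChar := PySem.List.pyGetD chaine i ""
      let addedChar := PySem.List.pyGetD chaine (i + k) ""
      let d := PySem.Dict.modify
        (PySem.Dict.modify st.1 (typeCharA deletedChar) 0 (· - 1))
        (typeCharA addedChar) 0 (· + 1)
      (d, if allValsA d then st.2 + 1 else st.2))
    (d1, nValides)
  st.2

-- ===== PORT B =====
def catB (c : String) : Int :=
  if PySem.Str.isIn c pvSpecStr then 0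
  else if PySem.Str.isIn c pvMinsStr then 1
  else if PySem.Str.isIn c pvNumsStr then 2
  else 3

def fuite_de_clavier_alt (n : Int) (k : Int) (chaine : List String) : Int :=
  (PySem.List.pyRange 0 (n - k + 1) 1).foldl
    (fun total i =>
      let cats : PySem.Set Int :=
        PySem.Set.ofList ((PySem.List.slice chaine (some i) (some (i + k))).map catB)
      if PySem.Set.len cats == 4 then total + 1 else total) 0

-- ===== PRECONDITION & SPEC =====
-- Pre_ restricts to the function's natural domain: a non-negative password length k and a declared
-- length n not exceeding the data (or no sliding at all, n ≤ k).  For k < 0 no meaningful window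
-- exists and A and B make different but equally defensible choices of what to count (A reads
-- chaine[i + k] through Python's negative indexing, B takes negative slices chaine[i:i+k]),
-- so those inputs are excluded; with n greater than both len(chaine) and k, A raises IndexError.
def Pre_fuite_de_clavier (n : Int) (k : Int) (chaine : List String) : Prop :=
  0 ≤ k ∧ (n ≤ (chaine.length : Int) ∨ n ≤ k)
instance (n : Int) (k : Int) (chaine : List String) : Decidable (Pre_fuite_de_clavier n k chaine) := by unfold Pre_fuite_de_clavier; infer_instance

def pvWitness_fuite_de_clavier : Int × Int × List String := (4, 4, ["a", "B", "1", "!"])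

-- a word covers all four character classes (read off with A's own classifier)
def coverB (w : List String) : Bool :=
  decide (∀ t ∈ ["nspec", "nmins", "nnums", "nmajs"], ∃ c ∈ w, typeCharA c = t)

-- When n < k there is no length-k substring, yet A still tests the truncated prefix chaine[:k] and
-- returns 1 if it happens to contain all four character classes; B returns the intended 0.
def D_fuite_de_clavier (n : Int) (k : Int) (chaine : List String) : Prop :=
  n < k ∧ coverB (chaine.take k.toNat) = true
instance (n : Int) (k : Int) (chaine : List String) : Decidable (D_fuite_de_clavier n k chaine) := by unfold D_fuite_de_clavier; infer_instance

def Spec_fuite_de_clavier (n : Int) (k : Int) (chaine : List String) (out : Int) : Prop := ¬ D_fuite_de_clavier n k chaine → out = fuite_de_clavier_alt n k chaine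
instance (n : Int) (k : Int) (chaine : List String) (out : Int) : Decidable (Spec_fuite_de_clavier n k chaine out) := by unfold Spec_fuite_de_clavier; infer_instance

def pvDiffWitness_fuite_de_clavier : Int × Int × List String := (1, 4, ["a", "B", "1", "!"])
def pvDiffWitnessOut_fuite_de_clavier : Int × Int := (1, 0)

-- ===== CLAIM (what is proved, stated in full; the proofs are below) =====
def Claim_unchanged_fuite_de_clavier : Prop := ∀ (n : Int) (k : Int) (chaine : List String), Dom_fuite_de_clavier n k chaine → Pre_fuite_de_clavier n k chaine → Spec_fuite_de_clavier n k chaine (fuite_de_clavier n k chaine)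
def Claim_changed_fuite_de_clavier : Prop := Dom_fuite_de_clavier (pvDiffWitness_fuite_de_clavier.1) (pvDiffWitness_fuite_de_clavier.2.1) (pvDiffWitness_fuite_de_clavier.2.2) ∧ Pre_fuite_de_clavier (pvDiffWitness_fuite_de_clavier.1) (pvDiffWitness_fuite_de_clavier.2.1) (pvDiffWitness_fuite_de_clavier.2.2) ∧ D_fuite_de_clavier (pvDiffWitness_fuite_de_clavier.1) (pvDiffWitness_fuite_de_clavier.2.1) (pvDiffWitness_fuite_de_clavier.2.2) ∧ fuite_de_clavier (pvDiffWitness_fuite_de_clavier.1) (pvDiffWitness_fuite_de_clavier.2.1) (pvDiffWitness_fuite_de_clavier.2.2) = pvDiffWitnessOut_fuite_de_clavier.1 ∧ fuite_de_clavier_alt (pvDiffWitness_fuite_de_clavier.1) (pvDiffWitness_fuite_de_clavier.2.1) (pvDiffWitness_fuite_de_clavier.2.2) = pvDiffWitnessOut_fuite_de_clavier.2 ∧ pvDiffWitnessOut_fuite_de_clavier.1 ≠ pvDiffWitnessOut_fuite_de_clavier.2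
def Claim_exact_fuite_de_clavier : Prop := ∀ (n : Int) (k : Int) (chaine : List String), Dom_fuite_de_clavier n k chaine → Pre_fuite_de_clavier n k chaine → D_fuite_de_clavier n k chaine → fuite_de_clavier n k chaine ≠ fuite_de_clavier_alt n k chaine

-- ===== LEMMAS AND PROOFS =====

-- the counter dict always keeps shape [("nmins",a),("nmajs",b),("nnums",c),("nspec",s)]
def cdict (a b c s : Int) : PySem.Dict String Int :=
  PySem.Dict.ofList [("nmins", a), ("nmajs", b), ("nnums", c), ("nspec", s)]

-- class-i count of a window, as the Int the dict stores
def cnt (w : List String) (i : Int) : Int := (w.countP (fun c => catB c == i) : Int)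

def countsD (w : List String) : PySem.Dict String Int :=
  cdict (cnt w 1) (cnt w 3) (cnt w 2) (cnt w 0)

-- window starting at j
def winW (chaine : List String) (kn : Nat) (j : Nat) : List String :=
  (chaine.drop j).take kn

theorem catB_cases (c : String) : catB c = 0 ∨ catB c = 1 ∨ catB c = 2 ∨ catB c = 3 := by
  unfold catB; split_ifs <;> simp

theorem typeCharA_eq (c : String) :
    typeCharA c = if catB c = 0 then "nspec" else if catB c = 1 then "nmins"
      else if catB c = 2 then "nnums" else "nmajs" := by
  unfold typeCharA catB; split_ifs <;> first | rfl | omega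

theorem modify_cdict (a b c s : Int) (ch : String) (f : Int → Int) :
    PySem.Dict.modify (cdict a b c s) (typeCharA ch) 0 f =
      if catB ch = 0 then cdict a b c (f s)
      else if catB ch = 1 then cdict (f a) b c s
      else if catB ch = 2 then cdict a b (f c) s
      else cdict a (f b) c s := by
  rw [typeCharA_eq]
  rcases catB_cases ch with h | h | h | h <;> simp [h] <;> rfl

theorem cnt_cons (ch : String) (t : List String) (i : Int) :
    cnt (ch :: t) i = cnt t i + (if catB ch = i then 1 else 0) := by
  by_cases h : catB ch = i <;> simp [cnt, List.countP_cons, h]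

theorem cnt_append_singleton (t : List String) (ch : String) (i : Int) :
    cnt (t ++ [ch]) i = cnt t i + (if catB ch = i then 1 else 0) := by
  by_cases h : catB ch = i <;> simp [cnt, List.countP_append, List.countP_cons, h]

theorem foldA (l : List String) (a b c s : Int) :
    l.foldl (fun d ch => PySem.Dict.modify d (typeCharA ch) 0 (· + 1)) (cdict a b c s)
      = cdict (a + cnt l 1) (b + cnt l 3) (c + cnt l 2) (s + cnt l 0) := by
  induction l generalizing a b c s with
  | nil => simp [cnt]
  | cons ch t ih =>
      rw [List.foldl_cons, modify_cdict]
      rcases catB_cases ch with h | h | h | h <;>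
        simp [h, ih, cnt_cons] <;> (try unfold cdict) <;> (try ring_nf)

theorem allValsA_cdict (a b c s : Int) :
    allValsA (cdict a b c s) = (!(a == 0) && !(b == 0) && !(c == 0) && !(s == 0)) := by
  show ([a, b, c, s].all fun v => !(v == 0)) = _
  simp [List.all_cons, Bool.and_assoc]

-- |{catB c : c ∈ w}| = 4 ↔ every class is hit
theorem set_len_four (w : List String) :
    (PySem.Set.len (PySem.Set.ofList (w.map catB)) == 4) =
      (!(cnt w 1 == 0) && !(cnt w 3 == 0) && !(cnt w 2 == 0) && !(cnt w 0 == 0)) := by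
  have hmem : ∀ i : Int, (i ∈ PySem.Set.ofList (w.map catB)) ↔ ¬ (cnt w i = 0) := by
    intro i
    rw [PySem.Set.mem_ofList]
    simp [cnt, List.countP_eq_zero]
  have hsub : PySem.Set.ofList (w.map catB) ⊆ [0, 1, 2, 3] := by
    intro x hx
    rw [PySem.Set.mem_ofList] at hx
    rcases List.mem_map.mp hx with ⟨c, _, rfl⟩
    rcases catB_cases c with h | h | h | h <;> simp [h]
  have hnd := PySem.Set.nodup_ofList (xs := w.map catB)
  have hle : (PySem.Set.ofList (w.map catB)).length ≤ 4 :=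
    (List.subperm_of_subset hnd hsub).length_le
  have hiff : (PySem.Set.ofList (w.map catB)).length = 4 ↔
      ((0:Int) ∈ PySem.Set.ofList (w.map catB) ∧ 1 ∈ PySem.Set.ofList (w.map catB) ∧
       2 ∈ PySem.Set.ofList (w.map catB) ∧ 3 ∈ PySem.Set.ofList (w.map catB)) := by
    constructor
    · intro hlen
      have hperm := (List.subperm_of_subset hnd hsub).perm_of_length_le (by simp [hlen])
      refine ⟨?_, ?_, ?_, ?_⟩ <;> · rw [hperm.mem_iff]; simp
    · rintro ⟨h0, h1, h2, h3⟩
      have hsup : ([0, 1, 2, 3] : List Int) ⊆ PySem.Set.ofList (w.map catB) := by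
        intro x hx; simp at hx
        rcases hx with rfl | rfl | rfl | rfl <;> assumption
      have := (List.subperm_of_subset (by decide) hsup).length_le
      simp at this
      omega
  have hiff2 : (PySem.Set.ofList (w.map catB)).length = 4 ↔
      (¬ cnt w 0 = 0 ∧ ¬ cnt w 1 = 0 ∧ ¬ cnt w 2 = 0 ∧ ¬ cnt w 3 = 0) := by
    rw [hiff, hmem 0, hmem 1, hmem 2, hmem 3]
  have hlen : PySem.Set.len (PySem.Set.ofList (w.map catB))
      = ((PySem.Set.ofList (w.map catB)).length : Int) := by
    simp [PySem.Set.len, pysem]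
  by_cases hL : (PySem.Set.ofList (w.map catB)).length = 4
  · obtain ⟨h0, h1, h2, h3⟩ := hiff2.mp hL
    simp [hlen, hL, h0, h1, h2, h3]
  · have hne : ((PySem.Set.ofList (w.map catB)).length : Int) ≠ 4 := by omega
    by_cases h0 : cnt w 0 = 0 <;> by_cases h1 : cnt w 1 = 0 <;>
      by_cases h2 : cnt w 2 = 0 <;> by_cases h3 : cnt w 3 = 0 <;>
      first
        | exact absurd (hiff2.mpr ⟨by assumption, by assumption, by assumption, by assumption⟩) hL
        | simp [hlen, hne, h0, h1, h2, h3]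

theorem valid_eq (w : List String) :
    allValsA (countsD w) = (PySem.Set.len (PySem.Set.ofList (w.map catB)) == 4) := by
  rw [countsD, allValsA_cdict, set_len_four]

theorem cnt_ne_any (w : List String) (i : Int) :
    (!(cnt w i == 0)) = w.any (fun c => catB c == i) := by
  cases h : w.any (fun c => catB c == i)
  · have : ∀ c ∈ w, ¬ (catB c == i) = true := by
      intro c hc; simpa using (List.any_eq_false.mp h) c hc
    have hz : w.countP (fun c => catB c == i) = 0 := List.countP_eq_zero.mpr this
    simp [cnt, hz]
  · rcases List.any_eq_true.mp h with ⟨c, hc, hci⟩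
    have hp : 0 < w.countP (fun c => catB c == i) := List.countP_pos_iff.mpr ⟨c, hc, hci⟩
    have : cnt w i ≠ 0 := by unfold cnt; exact Int.natCast_ne_zero.mpr hp.ne'
    simp [this]

theorem any_eq_decide (w : List String) (i : Int) :
    w.any (fun c => catB c == i) = decide (∃ c ∈ w, catB c = i) := by
  rw [Bool.eq_iff_iff]
  simp [List.any_eq_true]

theorem tA_spec (c : String) : typeCharA c = "nspec" ↔ catB c = 0 := by
  rcases catB_cases c with h | h | h | h <;> simp [typeCharA_eq, h]
theorem tA_mins (c : String) : typeCharA c = "nmins" ↔ catB c = 1 := by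
  rcases catB_cases c with h | h | h | h <;> simp [typeCharA_eq, h]
theorem tA_nums (c : String) : typeCharA c = "nnums" ↔ catB c = 2 := by
  rcases catB_cases c with h | h | h | h <;> simp [typeCharA_eq, h]
theorem tA_majs (c : String) : typeCharA c = "nmajs" ↔ catB c = 3 := by
  rcases catB_cases c with h | h | h | h <;> simp [typeCharA_eq, h]

theorem valid_cover (w : List String) : allValsA (countsD w) = coverB w := by
  rw [countsD, allValsA_cdict, cnt_ne_any, cnt_ne_any, cnt_ne_any, cnt_ne_any,
    any_eq_decide, any_eq_decide, any_eq_decide, any_eq_decide, coverB, Bool.eq_iff_iff]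
  simp [tA_spec, tA_mins, tA_nums, tA_majs]
  tauto

theorem winW_eq_cons (L : List String) (kn j : Nat) (hk : 1 ≤ kn) (hj : j < L.length) :
    winW L kn j = L.getD j "" :: (L.drop (j+1)).take (kn-1) := by
  obtain ⟨m, rfl⟩ : ∃ m, kn = m + 1 := ⟨kn - 1, by omega⟩
  rw [winW, List.drop_eq_getElem_cons hj, List.take_succ_cons, List.getD_eq_getElem _ _ hj]
  simp

theorem winW_succ_eq_append (L : List String) (kn j : Nat) (hk : 1 ≤ kn)
    (h : j + kn < L.length) :
    winW L kn (j+1) = (L.drop (j+1)).take (kn-1) ++ [L.getD (j+kn) ""] := by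
  obtain ⟨m, rfl⟩ : ∃ m, kn = m + 1 := ⟨kn - 1, by omega⟩
  have h2 : j + (m + 1) < L.length := h
  rw [winW, List.take_add_one, List.getElem?_drop,
    show j + 1 + m = j + (m + 1) by omega, List.getElem?_eq_getElem h2,
    List.getD_eq_getElem L "" h2]
  simp

theorem step_cdict (x y : String) (mid : List String) :
    PySem.Dict.modify
      (PySem.Dict.modify (countsD (x :: mid)) (typeCharA x) 0 (· - 1))
      (typeCharA y) 0 (· + 1) = countsD (mid ++ [y]) := by
  simp only [countsD]
  rw [modify_cdict]
  rcases catB_cases x with hx | hx | hx | hx <;> rw [hx] <;> norm_num <;>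
    rw [modify_cdict] <;>
    rcases catB_cases y with hy | hy | hy | hy <;> rw [hy] <;> norm_num <;>
    simp [cnt_cons, cnt_append_singleton, hx, hy, cdict]

theorem step_dict (L : List String) (kn j : Nat) (hk : 1 ≤ kn) (h : j + kn < L.length) :
    PySem.Dict.modify
      (PySem.Dict.modify (countsD (winW L kn j)) (typeCharA (L.getD j "")) 0 (· - 1))
      (typeCharA (L.getD (j+kn) "")) 0 (· + 1) = countsD (winW L kn (j+1)) := by
  rw [winW_eq_cons L kn j hk (by omega), winW_succ_eq_append L kn j hk h]
  exact step_cdict _ _ _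

theorem countP_range_succ_shift (p : Nat → Bool) (m : Nat) :
    (List.range (m+1)).countP p = (if p 0 then 1 else 0) + (List.range m).countP (fun t => p (t+1)) := by
  rw [List.range_succ_eq_map, List.countP_cons, List.countP_map]
  cases hp : p 0 <;> simp [hp, Function.comp_def, Nat.succ_eq_add_one] <;> omega

-- A's loop, characterised: after sliding over range(j, j+m) the dict counts window j+m
-- and the counter has grown by the number of valid windows j+1 .. j+m.
theorem loopA (L : List String) (k : Int) (kn : Nat) (hkkn : k = (kn : Int)) (hk1 : 1 ≤ kn) :
    ∀ (m j : Nat) (v : Int), j + m + kn ≤ L.length →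
    (PySem.List.pyRange (j : Int) ((j : Int) + (m : Int)) 1).foldl
      (fun (st : PySem.Dict String Int × Int) i =>
        let deletedChar := PySem.List.pyGetD L i ""
        let addedChar := PySem.List.pyGetD L (i + k) ""
        let d := PySem.Dict.modify
          (PySem.Dict.modify st.1 (typeCharA deletedChar) 0 (· - 1))
          (typeCharA addedChar) 0 (· + 1)
        (d, if allValsA d then st.2 + 1 else st.2))
      (countsD (winW L kn j), v)
    = (countsD (winW L kn (j + m)),
       v + ((List.range m).countP (fun t => allValsA (countsD (winW L kn (j+1+t)))) : Int)) := by
  intro m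
  induction m with
  | zero =>
      intro j v _
      rw [PySem.List.pyRange_one_eq_nil (by simp)]
      simp
  | succ m ih =>
      intro j v hlen
      rw [PySem.List.pyRange_one_cons (by push_cast; omega), List.foldl_cons]
      have hjk : (j : Int) + k = ((j + kn : Nat) : Int) := by push_cast [hkkn]; ring
      have hgd : PySem.List.pyGetD L (j : Int) "" = L.getD j "" := PySem.List.pyGetD_natCast L j ""
      have hga : PySem.List.pyGetD L ((j : Int) + k) "" = L.getD (j + kn) "" := by
        rw [hjk]; exact PySem.List.pyGetD_natCast L (j + kn) ""
      dsimp only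
      rw [hgd, hga, step_dict L kn j hk1 (by omega)]
      have hrange : (j : Int) + ((m + 1 : Nat) : Int) = ((j + 1 : Nat) : Int) + ((m : Nat) : Int) := by
        push_cast; ring
      have hcast : ((j : Int) + 1) = ((j + 1 : Nat) : Int) := by push_cast; ring
      rw [hrange, hcast, ih (j + 1) _ (by omega)]
      rw [Prod.mk.injEq]
      refine ⟨?_, ?_⟩
      · rw [show j + 1 + m = j + (m + 1) by omega]
      · have hs := countP_range_succ_shift (fun t => allValsA (countsD (winW L kn (j+1+t)))) m
        simp only [Nat.add_zero] at hs
        rw [hs, show (fun t => allValsA (countsD (winW L kn (j+1+(t+1)))))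
            = (fun t => allValsA (countsD (winW L kn (j+1+1+t)))) from
          funext fun t => by rw [show j+1+(t+1) = j+1+1+t by omega]]
        by_cases hb : allValsA (countsD (winW L kn (j+1))) <;>
          simp [hb] <;> push_cast <;> ring

-- B's loop, characterised: it counts the window starts whose window hits all four classes.
theorem foldB (L : List String) (k : Int) (l : List Int) (a : Int) :
    l.foldl
      (fun total i =>
        let cats : PySem.Set Int :=
          PySem.Set.ofList ((PySem.List.slice L (some i) (some (i + k))).map catB)
        if PySem.Set.len cats == 4 then total + 1 else total) a
      = a + ((l.countP (fun i =>
          PySem.Set.len (PySem.Set.ofList ((PySem.List.slice L (some i) (some (i + k))).map catB)) == 4) : Nat) : Int) := by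
  induction l generalizing a with
  | nil => simp
  | cons x t ih =>
      rw [List.foldl_cons, List.countP_cons]
      dsimp only
      rw [ih]
      cases h : (PySem.Set.len (PySem.Set.ofList
          ((PySem.List.slice L (some x) (some (x + k))).map catB)) == 4) <;>
        simp [h] <;> omega

theorem slice_win (L : List String) (k : Int) (kn : Nat) (hk : k = (kn : Int)) (j : Nat) :
    PySem.List.slice L (some ((j : Nat) : Int)) (some (((j : Nat) : Int) + k)) = winW L kn j := by
  rw [hk, PySem.List.slice_natCast_add L j kn, winW]

-- with k = 0 A's loop deletes and re-adds the same character: the state never changes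
theorem loopA_k0 (L : List String) :
    ∀ (l : List Int) (v : Int),
    l.foldl
      (fun (st : PySem.Dict String Int × Int) i =>
        let deletedChar := PySem.List.pyGetD L i ""
        let addedChar := PySem.List.pyGetD L (i + 0) ""
        let d := PySem.Dict.modify
          (PySem.Dict.modify st.1 (typeCharA deletedChar) 0 (· - 1))
          (typeCharA addedChar) 0 (· + 1)
        (d, if allValsA d then st.2 + 1 else st.2))
      (cdict 0 0 0 0, v)
    = (cdict 0 0 0 0, v) := by
  intro l
  induction l with
  | nil => intro v; rfl
  | cons i t ih =>
      intro v
      rw [List.foldl_cons]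
      dsimp only
      have hadd : PySem.List.pyGetD L (i + 0) "" = PySem.List.pyGetD L i "" := by
        rw [add_zero]
      have hstep : ∀ c : String,
          PySem.Dict.modify (PySem.Dict.modify (cdict 0 0 0 0) (typeCharA c) 0 (· - 1))
            (typeCharA c) 0 (· + 1) = cdict 0 0 0 0 := by
        intro c
        rw [modify_cdict]
        rcases catB_cases c with h | h | h | h <;>
          rw [h] <;> norm_num <;> rw [modify_cdict, h] <;> norm_num
      rw [hadd, hstep,
        show (if allValsA (cdict 0 0 0 0) = true then v + 1 else v) = v from rfl]
      exact ih v

-- when n < k, A reduces to testing the truncated prefix, B counts nothing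
theorem A_short (n k : Int) (chaine : List String) (hk : 0 ≤ k) (hlt : n < k) :
    fuite_de_clavier n k chaine = if coverB (chaine.take k.toNat) then 1 else 0 := by
  unfold fuite_de_clavier
  dsimp only
  have hsl : PySem.List.slice chaine none (some k) = chaine.take k.toNat := by
    rw [PySem.List.slice_to chaine hk]
  rw [hsl,
    show (PySem.Dict.ofList [("nmins", (0:Int)), ("nmajs", 0), ("nnums", 0), ("nspec", 0)])
      = cdict 0 0 0 0 from rfl, foldA,
    PySem.List.pyRange_one_eq_nil (by omega : n - k + 1 - 1 ≤ 0), List.foldl_nil]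
  have : cdict (0 + cnt (chaine.take k.toNat) 1) (0 + cnt (chaine.take k.toNat) 3)
      (0 + cnt (chaine.take k.toNat) 2) (0 + cnt (chaine.take k.toNat) 0)
      = countsD (chaine.take k.toNat) := by simp [countsD]
  rw [this, valid_cover]
  cases coverB (chaine.take k.toNat) <;> simp

theorem B_short (n k : Int) (chaine : List String) (hlt : n < k) :
    fuite_de_clavier_alt n k chaine = 0 := by
  unfold fuite_de_clavier_alt
  rw [PySem.List.pyRange_one_eq_nil (by omega : n - k + 1 ≤ 0), List.foldl_nil]

-- ===== VERDICT (by name: the statements are the Claim_ definitions above) =====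
theorem fuite_de_clavier_spec : Claim_unchanged_fuite_de_clavier := by
  intro n k chaine _ hpre
  obtain ⟨hk1, hnk⟩ := hpre
  unfold Spec_fuite_de_clavier
  intro hnd
  by_cases hlt : n < k
  · -- no full window: B counts nothing; ¬D forces A's prefix test to fail
    rw [A_short n k chaine hk1 hlt, B_short n k chaine hlt]
    have hcov : coverB (chaine.take k.toNat) = false := by
      by_contra h
      exact hnd ⟨hlt, by revert h; cases coverB (chaine.take k.toNat) <;> simp⟩
    rw [hcov]
    rfl
  unfold fuite_de_clavier fuite_de_clavier_alt
  dsimp only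
  by_cases hk0 : k = 0
  · -- k = 0: every window is empty on both sides; both return 0
    subst hk0
    have hone : PySem.List.slice chaine none (some 0) = [] := by
      rw [PySem.List.slice_to chaine le_rfl]; rfl
    have hsl : ∀ i : Int, PySem.List.slice chaine (some i) (some (i + 0)) = [] := by
      intro i
      rw [add_zero]
      exact List.eq_nil_of_length_eq_zero
        (by rw [PySem.List.length_slice]; exact Nat.sub_self _)
    rw [hone, List.foldl_nil]
    rw [show (allValsA (PySem.Dict.ofList
        [("nmins", (0:Int)), ("nmajs", 0), ("nnums", 0), ("nspec", 0)])) = false from rfl]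
    rw [if_neg (by simp),
      show (PySem.Dict.ofList [("nmins", (0:Int)), ("nmajs", 0), ("nnums", 0), ("nspec", 0)])
        = cdict 0 0 0 0 from rfl,
      loopA_k0, foldB]
    have hcnt0 : List.countP
        (fun i => PySem.Set.len (PySem.Set.ofList
          ((PySem.List.slice chaine (some i) (some (i + 0))).map catB)) == 4)
        (PySem.List.pyRange 0 (n - 0 + 1) 1) = 0 := by
      rw [List.countP_eq_zero]
      intro i _
      rw [hsl i]
      decide
    rw [hcnt0]
    rfl
  have hk : k = ((k.toNat : Nat) : Int) := by omega
  have hk1n : 1 ≤ k.toNat := by omega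
  have hslice : PySem.List.slice chaine none (some k) = winW chaine k.toNat 0 := by
    rw [PySem.List.slice_to chaine (by omega : (0:Int) ≤ k), winW]
    simp
  have hinit : (winW chaine k.toNat 0).foldl
      (fun d c => PySem.Dict.modify d (typeCharA c) 0 (· + 1))
      (PySem.Dict.ofList [("nmins", 0), ("nmajs", 0), ("nnums", 0), ("nspec", 0)])
      = countsD (winW chaine k.toNat 0) := by
    rw [show (PySem.Dict.ofList [("nmins", (0:Int)), ("nmajs", 0), ("nnums", 0), ("nspec", 0)])
        = cdict 0 0 0 0 from rfl, foldA]
    simp [countsD]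
  have hval0 : ∀ i : Int, i = 0 →
      (PySem.Set.len (PySem.Set.ofList
        ((PySem.List.slice chaine (some i) (some (i + k))).map catB)) == 4)
      = allValsA (countsD (winW chaine k.toNat 0)) := by
    intro i hi
    rw [hi, show (0 : Int) = ((0 : Nat) : Int) from rfl, slice_win chaine k k.toNat hk 0, valid_eq]
  rw [hslice, hinit, foldB]
  simp only [zero_add]
  by_cases hc : n - k + 1 ≤ 1
  · -- degenerate: no sliding, one window
    rw [show n - k + 1 - 1 = n - k by ring, PySem.List.pyRange_one_eq_nil (by omega),
      show n - k + 1 = 1 by omega, show PySem.List.pyRange 0 1 1 = [0] from rfl]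
    rw [List.foldl_nil, List.countP_cons, List.countP_nil]
    rw [hval0 0 rfl]
    cases allValsA (countsD (winW chaine k.toNat 0)) <;> simp
  · -- sliding case: n - k ≥ 1, hence n ≤ len chaine
    have hnlen : n ≤ (chaine.length : Int) := by
      rcases hnk with h | h
      · exact h
      · omega
    have hm : ((n - k).toNat : Int) = n - k := by omega
    have hmlen : 0 + (n - k).toNat + k.toNat ≤ chaine.length := by
      have h2 : ((k.toNat : Nat) : Int) = k := hk.symm
      omega
    have hl := loopA chaine k k.toNat hk hk1n (n - k).toNat 0
      (if allValsA (countsD (winW chaine k.toNat 0)) then 0 + 1 else 0) hmlen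
    simp only [Nat.cast_zero, zero_add, hm] at hl
    rw [show n - k + 1 - 1 = n - k by ring, hl]
    rw [PySem.List.pyRange_one_cons (by omega : (0:Int) < n - k + 1), List.countP_cons]
    rw [hval0 0 rfl]
    simp only [zero_add]
    have hrange : PySem.List.pyRange 1 (n - k + 1) 1
        = (List.range (n - k).toNat).map (fun t => (1 : Int) + (t : Nat)) := by
      have e : (n - k + 1 - 1).toNat = (n - k).toNat := by omega
      rw [PySem.List.pyRange_one, e]
    rw [hrange, List.countP_map]
    have hcongr : ∀ t ∈ List.range (n - k).toNat,
        ((fun i => PySem.Set.len (PySem.Set.ofList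
            ((PySem.List.slice chaine (some i) (some (i + k))).map catB)) == 4)
          ∘ (fun t : Nat => (1 : Int) + (t : Nat))) t
        = (fun t => allValsA (countsD (winW chaine k.toNat (1 + t)))) t := by
      intro t _
      have h1 : (1 : Int) + (t : Nat) = (((1 + t : Nat) : Nat) : Int) := by push_cast; ring
      simp only [Function.comp_apply]
      rw [h1, slice_win chaine k k.toNat hk (1 + t), valid_eq]
    have hcnt : List.countP
        ((fun i => PySem.Set.len (PySem.Set.ofList
            ((PySem.List.slice chaine (some i) (some (i + k))).map catB)) == 4)
          ∘ (fun t : Nat => (1 : Int) + (t : Nat))) (List.range (n - k).toNat)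
        = List.countP (fun t => allValsA (countsD (winW chaine k.toNat (1 + t))))
            (List.range (n - k).toNat) :=
      List.countP_congr (fun t ht => by rw [hcongr t ht])
    rw [hcnt]
    cases allValsA (countsD (winW chaine k.toNat 0)) <;> simp <;> push_cast <;> ring

theorem fuite_de_clavier_changed : Claim_changed_fuite_de_clavier := by
  unfold Claim_changed_fuite_de_clavier; decide

theorem fuite_de_clavier_tight : Claim_exact_fuite_de_clavier := by
  intro n k chaine _ hpre hd
  obtain ⟨hlt, hcov⟩ := hd
  rw [A_short n k chaine hpre.1 hlt, B_short n k chaine hlt, hcov]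
  decide
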